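-- pv_equiv track=rewrite | github.com/guinmoon/whatsaidreaming | scripts/abc_ttm_hufa_api.py | renum_tunes
-- ===== SOURCE A (Python) =====
-- def renum_tunes(full_abc):
--     res_abc=""
--     tunes_count=0
--     for line in full_abc.strip().split("\n"):
--         f_ind=line.find("X:")
--         if f_ind>=0:
--             tunes_count+=1
--             line = f"X:{tunes_count}"
--         res_abc+=line+"\n"
--     return (tunes_count,res_abc)
-- ===== SOURCE B (Python) =====
-- def renum_tunes(full_abc):
--     lines = full_abc.strip().split("\n")
--     total = sum(1 for line in lines if "X:" in line)
--     parts = []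
--     k = total
--     for line in reversed(lines):
--         if "X:" in line:
--             parts.append(f"X:{k}")
--             k -= 1
--         else:
--             parts.append(line)
--     parts.reverse()
--     return (total, "\n".join(parts) + "\n")
-- ===== Notes on version B (the rewrite author's own statement) =====
-- stated objective: alternative
-- what changed: B first counts the X-lines in a separate pass, then renumbers by traversing the lines back-to-front with a decreasing counter and joins the collected pieces at the end, instead of A's single forward pass that carries a running counter and grows the result string by repeated +=.
import Mathlib
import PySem

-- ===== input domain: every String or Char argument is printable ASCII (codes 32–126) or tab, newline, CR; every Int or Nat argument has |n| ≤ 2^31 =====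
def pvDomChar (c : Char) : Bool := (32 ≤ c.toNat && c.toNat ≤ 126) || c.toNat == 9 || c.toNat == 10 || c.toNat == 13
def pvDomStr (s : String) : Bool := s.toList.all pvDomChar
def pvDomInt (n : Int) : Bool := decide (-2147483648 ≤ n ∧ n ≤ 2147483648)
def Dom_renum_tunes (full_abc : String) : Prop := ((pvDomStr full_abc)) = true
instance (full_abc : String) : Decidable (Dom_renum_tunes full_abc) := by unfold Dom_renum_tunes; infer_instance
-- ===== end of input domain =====

-- B renumbers back-to-front after a separate counting pass and joins with '\n'.join,
-- instead of A's single forward pass with a running counter and string +=; objective: alternative.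


-- ===== PORT A =====
-- for line in …: find "X:"; if found, replace by "X:{count}"; accumulate res_abc += line + "\n"
def renum_tunes (full_abc : String) : Int × String :=
  let lines := PySem.Chars.splitOn (PySem.Chars.strip full_abc.toList) ['\n']
  let st := lines.foldl
    (fun (st : Int × List Char) line =>
      let f_ind := PySem.Chars.find line ['X', ':']
      if 0 ≤ f_ind then
        (st.1 + 1, st.2 ++ (['X', ':'] ++ PySem.Int.toChars (st.1 + 1)) ++ ['\n'])
      else
        (st.1, st.2 ++ line ++ ['\n']))
    ((0 : Int), ([] : List Char))
  (st.1, String.ofList st.2)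

-- ===== PORT B =====
-- count pass, then a reverse traversal with a decreasing counter, parts.reverse(), '\n'.join + "\n"
def renum_tunes_alt (full_abc : String) : Int × String :=
  let lines := PySem.Chars.splitOn (PySem.Chars.strip full_abc.toList) ['\n']
  let total : Int := (lines.filter (fun line => PySem.Chars.isIn ['X', ':'] line)).length
  let st := lines.reverse.foldl
    (fun (st : List (List Char) × Int) line =>
      if PySem.Chars.isIn ['X', ':'] line then
        (st.1 ++ [['X', ':'] ++ PySem.Int.toChars st.2], st.2 - 1)
      else
        (st.1 ++ [line], st.2))
    (([] : List (List Char)), total)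
  (total, String.ofList (PySem.Chars.join ['\n'] st.1.reverse ++ ['\n']))

-- ===== PRECONDITION & SPEC =====
def Spec_renum_tunes (full_abc : String) (out : Int × String) : Prop := out = renum_tunes_alt full_abc
instance (full_abc : String) (out : Int × String) : Decidable (Spec_renum_tunes full_abc out) := by unfold Spec_renum_tunes; infer_instance

-- ===== CLAIM (what is proved, stated in full; the proofs are below) =====
def Claim_equal_renum_tunes : Prop := ∀ (full_abc : String), Dom_renum_tunes full_abc → Spec_renum_tunes full_abc (renum_tunes full_abc)

-- ===== LEMMAS AND PROOFS =====

-- the renumbered list of lines, forward, counter k (proof-side reference function)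
def pvNum (l : List (List Char)) (k : Int) : List (List Char) :=
  match l with
  | [] => []
  | h :: t =>
    if PySem.Chars.isIn ['X', ':'] h then
      (['X', ':'] ++ PySem.Int.toChars (k + 1)) :: pvNum t (k + 1)
    else
      h :: pvNum t k

def pvCnt (l : List (List Char)) : Int :=
  ((l.filter (fun line => PySem.Chars.isIn ['X', ':'] line)).length : Int)

lemma pvCnt_cons (h : List Char) (t : List (List Char)) :
    pvCnt (h :: t) = (if PySem.Chars.isIn ['X', ':'] h then 1 else 0) + pvCnt t := by
  simp only [pvCnt, List.filter_cons]
  split_ifs with hp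
  · simp
    omega
  · simp

lemma find_cond (line : List Char) :
    (0 ≤ PySem.Chars.find line ['X', ':']) ↔ PySem.Chars.isIn ['X', ':'] line = true := by
  rw [PySem.Chars.find_nonneg_iff, PySem.Chars.isIn_iff_infix]

-- A's fold, generalized
lemma foldA (l : List (List Char)) (k : Int) (r : List Char) :
    l.foldl
      (fun (st : Int × List Char) line =>
        let f_ind := PySem.Chars.find line ['X', ':']
        if 0 ≤ f_ind then
          (st.1 + 1, st.2 ++ (['X', ':'] ++ PySem.Int.toChars (st.1 + 1)) ++ ['\n'])
        else
          (st.1, st.2 ++ line ++ ['\n'])) (k, r)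
    = (k + pvCnt l, r ++ (pvNum l k).flatMap (fun x => x ++ ['\n'])) := by
  induction l generalizing k r with
  | nil => simp [pvCnt, pvNum]
  | cons h t ih =>
    by_cases hp : PySem.Chars.isIn ['X', ':'] h = true
    · simp only [List.foldl_cons, if_pos ((find_cond h).mpr hp), ih, pvCnt_cons, if_pos hp,
        pvNum, List.flatMap_cons]
      rw [Prod.mk.injEq]
      exact ⟨by ring, by simp⟩
    · have hf : ¬ (0 ≤ PySem.Chars.find h ['X', ':']) := fun hc => hp ((find_cond h).mp hc)
      simp only [List.foldl_cons, if_neg hf, ih, pvCnt_cons, if_neg hp, pvNum, List.flatMap_cons]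
      rw [Prod.mk.injEq]
      exact ⟨by ring, by simp⟩

-- B's reverse fold, generalized
lemma foldB (l : List (List Char)) (k : Int) (parts : List (List Char)) :
    l.reverse.foldl
      (fun (st : List (List Char) × Int) line =>
        if PySem.Chars.isIn ['X', ':'] line then
          (st.1 ++ [['X', ':'] ++ PySem.Int.toChars st.2], st.2 - 1)
        else
          (st.1 ++ [line], st.2)) (parts, k)
    = (parts ++ (pvNum l (k - pvCnt l)).reverse, k - pvCnt l) := by
  induction l generalizing k parts with
  | nil => simp [pvCnt, pvNum]
  | cons h t ih =>
    rw [List.reverse_cons, List.foldl_append, ih]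
    by_cases hp : PySem.Chars.isIn ['X', ':'] h = true
    · have hk : k - pvCnt t - 1 = k - pvCnt (h :: t) := by
        rw [pvCnt_cons, if_pos hp]; ring
      simp only [List.foldl_cons, List.foldl_nil, if_pos hp]
      rw [show pvNum (h :: t) (k - pvCnt (h :: t))
            = (['X', ':'] ++ PySem.Int.toChars (k - pvCnt (h :: t) + 1))
              :: pvNum t (k - pvCnt (h :: t) + 1) from by simp [pvNum, hp]]
      have h1 : k - pvCnt (h :: t) + 1 = k - pvCnt t := by rw [pvCnt_cons, if_pos hp]; ring
      rw [h1, ← hk]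
      simp
    · have hk : pvCnt (h :: t) = pvCnt t := by rw [pvCnt_cons, if_neg hp]; ring
      simp only [List.foldl_cons, List.foldl_nil, if_neg hp]
      rw [show pvNum (h :: t) (k - pvCnt (h :: t)) = h :: pvNum t (k - pvCnt (h :: t)) from by
        simp [pvNum, hp]]
      rw [hk]
      simp

-- glue: flatMap (· ++ ['\n']) = join '\n' ++ ['\n'] on a nonempty list
lemma flatMap_eq_join (l : List (List Char)) (hne : l ≠ []) :
    l.flatMap (fun x => x ++ ['\n']) = PySem.Chars.join ['\n'] l ++ ['\n'] := by
  induction l with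
  | nil => exact absurd rfl hne
  | cons h t ih =>
    cases t with
    | nil => simp [PySem.Chars.join_singleton]
    | cons h2 t2 =>
      rw [List.flatMap_cons, ih (by simp), PySem.Chars.join_cons_cons]
      simp

lemma splitOn_go_ne_nil (sep : List Char) (fuel : Nat) :
    ∀ (l cur : List Char) (acc : List (List Char)),
      PySem.Chars.splitOn.go sep fuel l cur acc ≠ [] := by
  induction fuel with
  | zero => intro l cur acc; simp [PySem.Chars.splitOn.go]
  | succ n ih =>
    intro l cur acc
    cases l with
    | nil => simp [PySem.Chars.splitOn.go]
    | cons c rest =>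
      rw [PySem.Chars.splitOn.go]
      split_ifs
      · exact ih _ _ _
      · exact ih _ _ _

lemma splitOn_ne_nil (s sep : List Char) : PySem.Chars.splitOn s sep ≠ [] :=
  splitOn_go_ne_nil sep _ s [] []

-- pvNum keeps the length, so lines nonempty → pvNum nonempty
lemma pvNum_ne_nil (l : List (List Char)) (k : Int) (h : l ≠ []) : pvNum l k ≠ [] := by
  cases l with
  | nil => exact absurd rfl h
  | cons a t => simp only [pvNum]; split_ifs <;> simp

-- ===== VERDICT (by name: the statement is the Claim_ definition above) =====
theorem renum_tunes_spec : Claim_equal_renum_tunes := by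
  intro full_abc _
  unfold Spec_renum_tunes renum_tunes renum_tunes_alt
  simp only
  set lines := PySem.Chars.splitOn (PySem.Chars.strip full_abc.toList) ['\n'] with hlines
  have hne : lines ≠ [] := splitOn_ne_nil _ _
  rw [foldA, foldB]
  have hc : ((lines.filter (fun line => PySem.Chars.isIn ['X', ':'] line)).length : Int)
      = pvCnt lines := rfl
  rw [hc]
  have h0 : pvCnt lines - pvCnt lines = 0 := by ring
  rw [h0]
  simp only [List.nil_append, List.reverse_reverse, zero_add]
  rw [flatMap_eq_join _ (pvNum_ne_nil _ _ hne)]
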